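-- pv_equiv track=rewrite | github.com/Edison199902222/Leetcode_notes | leetcode/Binary search/变种二分/1044. Longest Duplicate Substring.py | caculate
-- ===== SOURCE A (Python) =====
-- def caculate(S, mid, n, base=26):
--     # 取两个 module， 避免冲突
--     module1 = 10 ** 9 + 7
--     module2 = 10 ** 9 + 9
--     code_s1 = code_s2 = 0
--     # 用两个hash 作为 标示，避免冲突
--     # 算第一个string的值
--     for i in range(mid):
--         code_s1 = (code_s1 * base + S[i]) % module1
--         code_s2 = (code_s2 * base + S[i]) % module2
--     # 算出total base
--     total_base1 = (base ** mid) % module1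
--     total_base2 = (base ** mid) % module2
--     # 如果出现和set中一样的值，说明出现两次
--     check = set()
--     check.add((code_s1, code_s2))
--     for i in range(1, n - mid + 1):
--         code_s1 = (code_s1 * base - S[i - 1] * total_base1 + S[i + mid - 1]) % module1
--         code_s2 = (code_s2 * base - S[i - 1] * total_base2 + S[i + mid - 1]) % module2
--         if (code_s1, code_s2) in check:
--             return i
--         check.add((code_s1, code_s2))
--     return -1
-- ===== SOURCE B (Python) =====
-- def caculate(S, mid, n, base=26):
--     # Recompute each window's double polynomial hash directly (no rolling update,
--     # no precomputed base**mid); same moduli so hash values and collisions match A.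
--     module1 = 10 ** 9 + 7
--     module2 = 10 ** 9 + 9
--     seen = set()
--     for i in range(n - mid + 1):
--         h1 = h2 = 0
--         for j in range(mid):
--             h1 = (h1 * base + S[i + j]) % module1
--             h2 = (h2 * base + S[i + j]) % module2
--         if i > 0 and (h1, h2) in seen:
--             return i
--         seen.add((h1, h2))
--     return -1
-- ===== Notes on version B (the rewrite author's own statement) =====
-- stated objective: alternative
-- what changed: Replaces the incrementally-updated rolling hash (seed hash + precomputed base**mid + subtract-leading/add-trailing update per shift) with a direct per-window recomputation of both polynomial hashes from scratch, checked against a set seeded inside the single window loop.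
-- outside the precondition, e.g. on caculate([0, 2, 2, 1, 6], -2, 91, 1): A returns 5, B returns 1
import Mathlib
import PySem

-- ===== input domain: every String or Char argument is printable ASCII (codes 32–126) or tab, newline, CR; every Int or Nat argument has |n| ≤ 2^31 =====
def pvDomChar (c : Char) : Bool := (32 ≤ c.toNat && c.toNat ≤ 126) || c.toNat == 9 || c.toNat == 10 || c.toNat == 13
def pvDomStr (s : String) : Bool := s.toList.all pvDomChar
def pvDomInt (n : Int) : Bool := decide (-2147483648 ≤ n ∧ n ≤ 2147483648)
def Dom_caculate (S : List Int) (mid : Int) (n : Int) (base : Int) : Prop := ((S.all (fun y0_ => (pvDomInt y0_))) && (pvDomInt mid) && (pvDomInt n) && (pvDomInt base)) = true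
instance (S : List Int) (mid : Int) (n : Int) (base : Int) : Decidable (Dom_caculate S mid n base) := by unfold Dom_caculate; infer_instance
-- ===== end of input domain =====

-- B replaces A's incrementally-updated rolling double hash (seed + precomputed base**mid +
-- subtract-leading/add-trailing update) by a direct from-scratch recomputation of both window
-- hashes for every window (alternative decomposition, not faster; same moduli, so identical values).

-- ===== PORT A =====
-- 'c1, c2 = ...' of the rolling update, computed once per iteration (mirrors A's two assignments)
def rollStepA (S : List Int) (mid base tb1 tb2 m1 m2 i : Int) (c : Int × Int) : Int × Int :=
  (PySem.Int.mod (c.1 * base - PySem.List.pyGetD S (i - 1) 0 * tb1 + PySem.List.pyGetD S (i + mid - 1) 0) m1,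
   PySem.Int.mod (c.2 * base - PySem.List.pyGetD S (i - 1) 0 * tb2 + PySem.List.pyGetD S (i + mid - 1) 0) m2)

-- the second for-loop of A, with its early 'return i', as structural recursion over the range list
def caculateLoopA (S : List Int) (mid base tb1 tb2 m1 m2 : Int) :
    List Int → Int × Int → PySem.Set (Int × Int) → Int
  | [], _, _ => -1
  | i :: rest, c, check =>
    if rollStepA S mid base tb1 tb2 m1 m2 i c ∈ check then i
    else caculateLoopA S mid base tb1 tb2 m1 m2 rest
      (rollStepA S mid base tb1 tb2 m1 m2 i c)
      (PySem.Set.add check (rollStepA S mid base tb1 tb2 m1 m2 i c))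

-- S[i] is pyGetD (exact under Pre_: all indices in range, no negative wraparound);
-- base ** mid is base ^ mid.toNat (exact under Pre_'s 0 ≤ mid; Python leaves int for mid < 0).
def caculate (S : List Int) (mid : Int) (n : Int) (base : Int) : Int :=
  let module1 : Int := 10 ^ 9 + 7
  let module2 : Int := 10 ^ 9 + 9
  let seed := (PySem.List.pyRange 0 mid 1).foldl
    (fun (c : Int × Int) i =>
      (PySem.Int.mod (c.1 * base + PySem.List.pyGetD S i 0) module1,
       PySem.Int.mod (c.2 * base + PySem.List.pyGetD S i 0) module2)) (0, 0)
  let total_base1 := PySem.Int.mod (base ^ mid.toNat) module1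
  let total_base2 := PySem.Int.mod (base ^ mid.toNat) module2
  caculateLoopA S mid base total_base1 total_base2 module1 module2
    (PySem.List.pyRange 1 (n - mid + 1) 1) seed
    (PySem.Set.add PySem.Set.empty seed)

-- ===== PORT B =====
-- 'h1 = h2 = 0; for j in range(mid): ...' — the per-window double hash, recomputed from scratch
def caculateWin (S : List Int) (mid base m1 m2 i : Int) : Int × Int :=
  (PySem.List.pyRange 0 mid 1).foldl
    (fun (h : Int × Int) j =>
      (PySem.Int.mod (h.1 * base + PySem.List.pyGetD S (i + j) 0) m1,
       PySem.Int.mod (h.2 * base + PySem.List.pyGetD S (i + j) 0) m2)) (0, 0)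

-- B's single window loop with its early 'return i', as structural recursion over the range list
def caculateLoopB (S : List Int) (mid base m1 m2 : Int) :
    List Int → PySem.Set (Int × Int) → Int
  | [], _ => -1
  | i :: rest, seen =>
    if 0 < i ∧ caculateWin S mid base m1 m2 i ∈ seen then i
    else caculateLoopB S mid base m1 m2 rest
      (PySem.Set.add seen (caculateWin S mid base m1 m2 i))

def caculate_alt (S : List Int) (mid : Int) (n : Int) (base : Int) : Int :=
  caculateLoopB S mid base (10 ^ 9 + 7) (10 ^ 9 + 9)
    (PySem.List.pyRange 0 (n - mid + 1) 1) PySem.Set.empty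

-- ===== PRECONDITION & SPEC =====
-- Pre_ excludes: mid < 0 with mid < n, where Python's base ** mid is a float and A's result
-- follows float rolling hashes (A sometimes still returns an int there — cited in claim.json);
-- mid < 0 with base = 0 (ZeroDivisionError); and the out-of-range inputs on which A's S[...]
-- indexing raises IndexError — inputs with n > len(S) stay inside Pre_ exactly when a
-- duplicated length-mid window makes A return before any invalid index.
def Pre_caculate (S : List Int) (mid : Int) (n : Int) (base : Int) : Prop :=
  (0 ≤ mid ∧ mid ≤ (S.length : Int) ∧
    (n ≤ (S.length : Int) ∨
      ∃ q ∈ Finset.range (S.length + 1), (q : Int) ≤ n - mid ∧ (q : Int) + mid ≤ (S.length : Int) ∧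
        ∃ p ∈ Finset.range q, (S.drop p).take mid.toNat = (S.drop q).take mid.toNat)) ∨
  (mid < 0 ∧ base ≠ 0 ∧ n ≤ mid)
instance (S : List Int) (mid : Int) (n : Int) (base : Int) : Decidable (Pre_caculate S mid n base) := by unfold Pre_caculate; infer_instance

def pvWitness_caculate : List Int × Int × Int × Int := ([1, 2, 1, 2], 2, 4, 26)

def Spec_caculate (S : List Int) (mid : Int) (n : Int) (base : Int) (out : Int) : Prop := out = caculate_alt S mid n base
instance (S : List Int) (mid : Int) (n : Int) (base : Int) (out : Int) : Decidable (Spec_caculate S mid n base out) := by unfold Spec_caculate; infer_instance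

-- ===== CLAIM (what is proved, stated in full; the proofs are below) =====
def Claim_equal_caculate : Prop := ∀ (S : List Int) (mid : Int) (n : Int) (base : Int), Dom_caculate S mid n base → Pre_caculate S mid n base → Spec_caculate S mid n base (caculate S mid n base)

-- ===== LEMMAS AND PROOFS =====

-- the running polynomial hash of the length-K window starting at i, modulo m (the value both
-- programs' inner folds compute)
def winH (s : Int → Int) (base m i : Int) (K : ℕ) : Int :=
  (List.range K).foldl (fun (h : Int) (j : ℕ) => PySem.Int.mod (h * base + s (i + (j : Int))) m) 0

-- its image in ZMod M
def zwinH {M : ℕ} (z : Int → ZMod M) (b : ZMod M) (i : Int) (K : ℕ) : ZMod M :=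
  (List.range K).foldl (fun (h : ZMod M) (j : ℕ) => h * b + z (i + (j : Int))) 0

lemma foldl_mod_bounds (m : Int) (hm : 0 < m) (base : Int) (s : ℕ → Int) (l : List ℕ) :
    ∀ h0 : Int, 0 ≤ h0 → h0 < m →
      0 ≤ l.foldl (fun (h : Int) (j : ℕ) => PySem.Int.mod (h * base + s j) m) h0 ∧
      l.foldl (fun (h : Int) (j : ℕ) => PySem.Int.mod (h * base + s j) m) h0 < m := by
  induction l with
  | nil => intro h0 h1 h2; exact ⟨h1, h2⟩
  | cons x xs ih =>
    intro h0 _ _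
    exact ih _ (PySem.Int.mod_nonneg _ hm) (PySem.Int.mod_lt _ hm)

lemma winH_bounds (s : Int → Int) (base : Int) (M : ℕ) (hM : 0 < (M : Int)) (i : Int) (K : ℕ) :
    0 ≤ winH s base (M : Int) i K ∧ winH s base (M : Int) i K < (M : Int) := by
  unfold winH
  exact foldl_mod_bounds (M : Int) hM base (fun j => s (i + (j : Int))) (List.range K) 0 le_rfl hM

lemma foldl_mod_cast {M : ℕ} (hM : 0 < M) (base : Int) (s : ℕ → Int) (l : List ℕ) :
    ∀ h0 : Int,
      ((l.foldl (fun (h : Int) (j : ℕ) => PySem.Int.mod (h * base + s j) (M : Int)) h0 : Int) : ZMod M)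
        = l.foldl (fun (h : ZMod M) (j : ℕ) => h * (base : ZMod M) + ((s j : Int) : ZMod M)) ((h0 : Int) : ZMod M) := by
  induction l with
  | nil => intro h0; rfl
  | cons x xs ih =>
    intro h0
    simp only [List.foldl_cons]
    rw [ih]
    congr 1
    rw [PySem.Int.mod_eq_emod_of_pos (by exact_mod_cast hM), ZMod.intCast_mod]
    push_cast
    ring

lemma winH_cast {M : ℕ} (hM : 0 < M) (s : Int → Int) (base i : Int) (K : ℕ) :
    ((winH s base (M : Int) i K : Int) : ZMod M)
      = zwinH (fun t => ((s t : Int) : ZMod M)) ((base : Int) : ZMod M) i K := by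
  unfold winH zwinH
  simpa only [Int.cast_zero] using foldl_mod_cast hM base (fun j => s (i + (j : Int))) (List.range K) 0

lemma zwinH_succ {M : ℕ} (z : Int → ZMod M) (b : ZMod M) (i : Int) (K : ℕ) :
    zwinH z b i (K + 1) = zwinH z b i K * b + z (i + (K : Int)) := by
  simp [zwinH, List.range_succ]

lemma zroll {M : ℕ} (z : Int → ZMod M) (b : ZMod M) (i : Int) :
    ∀ K : ℕ, zwinH z b (i - 1) K * b + z (i - 1 + (K : Int))
      = zwinH z b i K + z (i - 1) * b ^ K := by
  intro K
  induction K with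
  | zero => simp [zwinH]
  | succ K ih =>
    rw [zwinH_succ, zwinH_succ]
    have e1 : i - 1 + ((K + 1 : ℕ) : Int) = i + (K : Int) := by push_cast; ring
    have e2 : i - 1 + ((K : ℕ) : Int) = i - 1 + (K : Int) := rfl
    rw [e1, e2]
    have : (b : ZMod M) ^ (K + 1) = b ^ K * b := by ring
    rw [this]
    linear_combination b * ih

lemma zmod_int_inj (M : ℕ) (a c : Int) (h1 : 0 ≤ a) (h2 : a < (M : Int))
    (h3 : 0 ≤ c) (h4 : c < (M : Int)) (h : (a : ZMod M) = (c : ZMod M)) : a = c := by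
  have hd : (M : Int) ∣ c - a := ((ZMod.intCast_eq_intCast_iff a c M).mp h).dvd
  have : c - a = 0 := Int.eq_zero_of_abs_lt_dvd hd (by rw [abs_lt]; omega)
  omega

lemma int_roll (M : ℕ) (hM : 0 < M) (base : Int) (s : Int → Int) (i : Int) (K : ℕ) :
    PySem.Int.mod (winH s base (M : Int) (i - 1) K * base
        - s (i - 1) * PySem.Int.mod (base ^ K) (M : Int) + s (i - 1 + (K : Int))) (M : Int)
      = winH s base (M : Int) i K := by
  have hm : (0 : Int) < (M : Int) := by exact_mod_cast hM
  apply zmod_int_inj M _ _ (PySem.Int.mod_nonneg _ hm) (PySem.Int.mod_lt _ hm)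
    (winH_bounds s base M hm i K).1 (winH_bounds s base M hm i K).2
  rw [PySem.Int.mod_eq_emod_of_pos hm, ZMod.intCast_mod]
  push_cast
  rw [PySem.Int.mod_eq_emod_of_pos hm, ZMod.intCast_mod]
  rw [winH_cast hM, winH_cast hM]
  push_cast
  linear_combination zroll (fun t => ((s t : Int) : ZMod M)) ((base : Int) : ZMod M) i K

lemma win_eq (S : List Int) (mid base : Int) (M1 M2 : ℕ) (i : Int) :
    caculateWin S mid base (M1 : Int) (M2 : Int) i
      = (winH (fun t => PySem.List.pyGetD S t 0) base (M1 : Int) i mid.toNat,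
         winH (fun t => PySem.List.pyGetD S t 0) base (M2 : Int) i mid.toNat) := by
  unfold caculateWin winH
  rw [PySem.List.pyRange_one, List.foldl_map]
  rw [PySem.List.foldl_prod_mk
    (f := fun (h : Int) (j : ℕ) => PySem.Int.mod (h * base + PySem.List.pyGetD S (i + ((0 : Int) + (j : Int))) 0) (M1 : Int))
    (g := fun (h : Int) (j : ℕ) => PySem.Int.mod (h * base + PySem.List.pyGetD S (i + ((0 : Int) + (j : Int))) 0) (M2 : Int))]
  simp

lemma seed_eq (S : List Int) (mid base : Int) (M1 M2 : ℕ) :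
    ((PySem.List.pyRange 0 mid 1).foldl
      (fun (c : Int × Int) i =>
        (PySem.Int.mod (c.1 * base + PySem.List.pyGetD S i 0) (M1 : Int),
         PySem.Int.mod (c.2 * base + PySem.List.pyGetD S i 0) (M2 : Int))) (0, 0))
      = (winH (fun t => PySem.List.pyGetD S t 0) base (M1 : Int) 0 mid.toNat,
         winH (fun t => PySem.List.pyGetD S t 0) base (M2 : Int) 0 mid.toNat) := by
  unfold winH
  rw [PySem.List.pyRange_one, List.foldl_map]
  rw [PySem.List.foldl_prod_mk
    (f := fun (h : Int) (j : ℕ) => PySem.Int.mod (h * base + PySem.List.pyGetD S ((0 : Int) + (j : Int)) 0) (M1 : Int))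
    (g := fun (h : Int) (j : ℕ) => PySem.Int.mod (h * base + PySem.List.pyGetD S ((0 : Int) + (j : Int)) 0) (M2 : Int))]
  simp

lemma rollStep_eq (S : List Int) (mid base : Int) (M1 M2 : ℕ) (hM1 : 0 < M1) (hM2 : 0 < M2)
    (hmid : 0 ≤ mid) (i : Int) :
    rollStepA S mid base (PySem.Int.mod (base ^ mid.toNat) (M1 : Int))
        (PySem.Int.mod (base ^ mid.toNat) (M2 : Int)) (M1 : Int) (M2 : Int) i
        (winH (fun t => PySem.List.pyGetD S t 0) base (M1 : Int) (i - 1) mid.toNat,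
         winH (fun t => PySem.List.pyGetD S t 0) base (M2 : Int) (i - 1) mid.toNat)
      = (winH (fun t => PySem.List.pyGetD S t 0) base (M1 : Int) i mid.toNat,
         winH (fun t => PySem.List.pyGetD S t 0) base (M2 : Int) i mid.toNat) := by
  have e : i - 1 + (mid.toNat : Int) = i + mid - 1 := by omega
  have h1 := int_roll M1 hM1 base (fun t => PySem.List.pyGetD S t 0) i mid.toNat
  have h2 := int_roll M2 hM2 base (fun t => PySem.List.pyGetD S t 0) i mid.toNat
  rw [e] at h1 h2
  simp only [rollStepA]
  exact Prod.ext (by simpa using h1) (by simpa using h2)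

lemma loop_eq (S : List Int) (mid base : Int) (M1 M2 : ℕ) (hM1 : 0 < M1) (hM2 : 0 < M2)
    (hmid : 0 ≤ mid) :
    ∀ (k : ℕ) (i : Int) (seen : PySem.Set (Int × Int)), 1 ≤ i →
      caculateLoopA S mid base (PySem.Int.mod (base ^ mid.toNat) (M1 : Int))
          (PySem.Int.mod (base ^ mid.toNat) (M2 : Int)) (M1 : Int) (M2 : Int)
          (PySem.List.pyRange i (i + (k : Int)) 1)
          (winH (fun t => PySem.List.pyGetD S t 0) base (M1 : Int) (i - 1) mid.toNat,
           winH (fun t => PySem.List.pyGetD S t 0) base (M2 : Int) (i - 1) mid.toNat) seen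
        = caculateLoopB S mid base (M1 : Int) (M2 : Int)
            (PySem.List.pyRange i (i + (k : Int)) 1) seen := by
  intro k
  induction k with
  | zero =>
    intro i seen hi
    rw [PySem.List.pyRange_one_eq_nil (by omega)]
    rfl
  | succ k ih =>
    intro i seen hi
    rw [PySem.List.pyRange_one_cons (by push_cast; omega)]
    simp only [caculateLoopA, caculateLoopB]
    rw [rollStep_eq S mid base M1 M2 hM1 hM2 hmid i, win_eq]
    have hcond : (0 < i) = True := by simp; omega
    by_cases hmem :
        (winH (fun t => PySem.List.pyGetD S t 0) base (M1 : Int) i mid.toNat,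
         winH (fun t => PySem.List.pyGetD S t 0) base (M2 : Int) i mid.toNat) ∈ seen
    · simp [hmem, show (0:Int) < i by omega]
    · simp only [hmem, hcond, true_and, if_false]
      have e3 : i + ((k + 1 : ℕ) : Int) = (i + 1) + (k : Int) := by push_cast; ring
      have e4 : i + 1 - 1 = i := by ring
      have := ih (i + 1) (PySem.Set.add seen
        (winH (fun t => PySem.List.pyGetD S t 0) base (M1 : Int) i mid.toNat,
         winH (fun t => PySem.List.pyGetD S t 0) base (M2 : Int) i mid.toNat)) (by omega)
      rw [e4] at this
      rw [e3]
      exact this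

-- ===== VERDICT (by name: the statement is the Claim_ definition above) =====
theorem caculate_spec : Claim_equal_caculate := by
  intro S mid n base _hDom hPre
  rcases hPre with ⟨hmid, _hmlen, _hnlen⟩ | ⟨hneg, _hbase, hnm⟩
  case inr =>
    -- mid < 0 and n ≤ mid: both loops are empty (up to B's seeding window) and both return -1
    unfold Spec_caculate caculate caculate_alt
    simp only []
    rcases lt_or_eq_of_le hnm with hlt | heq
    · rw [PySem.List.pyRange_one_eq_nil (a := 1) (b := n - mid + 1) (by omega),
        PySem.List.pyRange_one_eq_nil (a := 0) (b := n - mid + 1) (by omega)]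
      rfl
    · rw [show n - mid + 1 = 1 from by omega]
      rw [PySem.List.pyRange_one_eq_nil (a := 1) (b := 1) (by omega)]
      rw [show PySem.List.pyRange 0 1 1 = [0] from by decide]
      simp [caculateLoopB, caculateLoopA]
  unfold Spec_caculate caculate caculate_alt
  have eM1 : (10 ^ 9 + 7 : Int) = ((1000000007 : ℕ) : Int) := by norm_num
  have eM2 : (10 ^ 9 + 9 : Int) = ((1000000009 : ℕ) : Int) := by norm_num
  rw [eM1, eM2]
  simp only []
  rw [seed_eq S mid base 1000000007 1000000009]
  by_cases hc : n - mid + 1 ≤ 0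
  · rw [PySem.List.pyRange_one_eq_nil (by omega), PySem.List.pyRange_one_eq_nil (by omega)]
    rfl
  · rw [show (PySem.List.pyRange 0 (n - mid + 1) 1)
        = 0 :: PySem.List.pyRange 1 (n - mid + 1) 1 from
      PySem.List.pyRange_one_cons (by omega)]
    simp only [caculateLoopB, lt_irrefl, false_and, if_false]
    rw [win_eq]
    have e5 : (n - mid + 1 : Int) = 1 + (((n - mid).toNat : ℕ) : Int) := by omega
    rw [e5]
    have := loop_eq S mid base 1000000007 1000000009 (by norm_num) (by norm_num) hmid
      (n - mid).toNat 1 (PySem.Set.add PySem.Set.empty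
        (winH (fun t => PySem.List.pyGetD S t 0) base ((1000000007 : ℕ) : Int) 0 mid.toNat,
         winH (fun t => PySem.List.pyGetD S t 0) base ((1000000009 : ℕ) : Int) 0 mid.toNat)) le_rfl
    rw [show (1 : Int) - 1 = 0 by ring] at this
    exact this
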